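-- pv_equiv track=rewrite | github.com/ayush4750kumar-creator/gramblefinal | agents/agentC.py | is_market_news
-- ===== SOURCE A (Python) =====
-- def is_market_news(title: str) -> bool:
--     t = title.lower()
--     return any(kw in t for kw in [
--         'stock', 'market', 'nifty', 'sensex', 'bse', 'nse', 'share', 'equity',
--         'trading', 'invest', 'earning', 'profit', 'revenue', 'ipo', 'fund',
--         'economy', 'gdp', 'inflation', 'rate', 'rbi', 'sebi', 'rupee', 'oil',
--         'gold', 'crypto', 'nasdaq', 'dow', 'fed', 'tariff', 'trade', 'bank',
--         'finance', 'fiscal',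
--     ])
-- ===== SOURCE B (Python) =====
-- _KEYWORDS = tuple(
--     'stock market nifty sensex bse nse share equity trading invest '
--     'earning profit revenue ipo fund economy gdp inflation rate rbi '
--     'sebi rupee oil gold crypto nasdaq dow fed tariff trade bank '
--     'finance fiscal'.split()
-- )
--
-- def is_market_news(title: str) -> bool:
--     t = title.lower()
--     return any(t.startswith(_KEYWORDS, i) for i in range(len(t) + 1))
-- ===== Notes on version B (the rewrite author's own statement) =====
-- stated objective: alternative
-- what changed: Replaces the keyword-major loop of 33 independent substring searches over the lowered title by a single position-major scan that asks at each position whether any keyword starts there (str.startswith with a tuple), with the keywords stored as one space-separated string split once at module load.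
import Mathlib
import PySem

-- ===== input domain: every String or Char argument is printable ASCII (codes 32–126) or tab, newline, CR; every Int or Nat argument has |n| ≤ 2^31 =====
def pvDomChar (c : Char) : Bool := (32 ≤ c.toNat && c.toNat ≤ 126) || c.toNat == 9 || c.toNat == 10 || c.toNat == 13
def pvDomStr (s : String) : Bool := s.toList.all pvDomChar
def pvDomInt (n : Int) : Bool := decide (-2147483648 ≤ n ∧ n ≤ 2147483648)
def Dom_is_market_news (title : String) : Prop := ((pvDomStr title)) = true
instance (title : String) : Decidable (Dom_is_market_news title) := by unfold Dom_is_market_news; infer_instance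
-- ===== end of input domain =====

-- B replaces A's keyword-major loop of 33 substring searches with a position-major scan of the
-- lowered title (one startswith-against-all-keywords test per position), keywords kept as one
-- space-separated string split once (alternative decomposition, same cost).


-- ===== PORT A =====
-- t = title.lower(); any(kw in t for kw in ['stock', …])
def is_market_news (title : String) : Bool :=
  let t := PySem.Str.lower title
  (["stock", "market", "nifty", "sensex", "bse", "nse", "share", "equity",
    "trading", "invest", "earning", "profit", "revenue", "ipo", "fund",
    "economy", "gdp", "inflation", "rate", "rbi", "sebi", "rupee", "oil",
    "gold", "crypto", "nasdaq", "dow", "fed", "tariff", "trade", "bank",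
    "finance", "fiscal"]).any (fun kw => PySem.Str.isIn kw t)

-- ===== PORT B =====
-- _KEYWORDS = '… one space-separated string …'.split()
def pvKeywords : List String :=
  PySem.Str.split₀ ("stock market nifty sensex bse nse share equity trading invest earning profit revenue ipo fund economy gdp inflation rate rbi sebi rupee oil gold crypto nasdaq dow fed tariff trade bank finance fiscal")

-- 'any(t.startswith(_KEYWORDS, i) for i in range(len(t) + 1))': walk the suffixes of t
-- (one per position i, including the empty one) and test at each whether some keyword starts there.
def pvScan (kws : List String) : List Char → Bool
  | [] => kws.any (fun kw => kw.toList.isPrefixOf ([] : List Char))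
  | c :: rest => kws.any (fun kw => kw.toList.isPrefixOf (c :: rest)) || pvScan kws rest

def is_market_news_alt (title : String) : Bool :=
  pvScan pvKeywords (PySem.Str.lower title).toList

-- ===== PRECONDITION & SPEC =====
def Spec_is_market_news (title : String) (out : Bool) : Prop := out = is_market_news_alt title
instance (title : String) (out : Bool) : Decidable (Spec_is_market_news title out) := by unfold Spec_is_market_news; infer_instance

-- ===== CLAIM (what is proved, stated in full; the proofs are below) =====
def Claim_equal_is_market_news : Prop := ∀ (title : String), Dom_is_market_news title → Spec_is_market_news title (is_market_news title)

-- ===== LEMMAS AND PROOFS =====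
-- B's split of the single keyword string yields exactly A's keyword list
set_option maxRecDepth 20000 in
theorem pvKeywords_eq :
    pvKeywords =
      ["stock", "market", "nifty", "sensex", "bse", "nse", "share", "equity",
       "trading", "invest", "earning", "profit", "revenue", "ipo", "fund",
       "economy", "gdp", "inflation", "rate", "rbi", "sebi", "rupee", "oil",
       "gold", "crypto", "nasdaq", "dow", "fed", "tariff", "trade", "bank",
       "finance", "fiscal"] := by decide

-- the position scan finds a keyword iff some keyword is an infix of the scanned list
theorem pvScan_iff (kws : List String) (s : List Char) :
    pvScan kws s = true ↔ ∃ kw ∈ kws, kw.toList <:+: s := by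
  induction s with
  | nil => simp [pvScan, List.isPrefixOf_iff_prefix]
  | cons c rest ih =>
      simp only [pvScan, Bool.or_eq_true, List.any_eq_true, List.isPrefixOf_iff_prefix, ih,
        List.infix_cons_iff]
      constructor
      · rintro (⟨kw, hm, hp⟩ | ⟨kw, hm, hi⟩)
        · exact ⟨kw, hm, Or.inl hp⟩
        · exact ⟨kw, hm, Or.inr hi⟩
      · rintro ⟨kw, hm, hp | hi⟩
        · exact Or.inl ⟨kw, hm, hp⟩
        · exact Or.inr ⟨kw, hm, hi⟩

-- ===== VERDICT (by name: the statement is the Claim_ definition above) =====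
theorem is_market_news_spec : Claim_equal_is_market_news := by
  intro title _
  unfold Spec_is_market_news is_market_news is_market_news_alt
  rw [Bool.eq_iff_iff, pvScan_iff, pvKeywords_eq]
  simp [PySem.Chars.isIn_iff_infix]
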